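-- pv_equiv track=rewrite | github.com/ai-guru-global/resolve-agent | python/src/resolveagent/fta/cut_sets.py | _remove_absorbed_cut_sets
-- ===== SOURCE A (Python) =====
-- def _remove_absorbed_cut_sets(cut_sets: list[set[str]]) -> list[set[str]]:
--     """Remove absorbed (superset) cut sets.
--
--     A cut set is absorbed if it is a superset of another cut set.
--     Minimal cut sets should not contain any other cut set as a subset.
--
--     Args:
--         cut_sets: List of cut sets.
--
--     Returns:
--         List of minimal cut sets with absorbed sets removed.
--     """
--     if not cut_sets:
--         return []
--
--     # Sort by size (smallest first) for efficient absorption check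
--     sorted_cut_sets = sorted(cut_sets, key=lambda x: (len(x), sorted(x)))
--
--     minimal = []
--     for cut_set in sorted_cut_sets:
--         # Check if this cut set is absorbed by any already-minimal set
--         is_absorbed = False
--         for minimal_set in minimal:
--             if minimal_set <= cut_set:  # minimal_set is subset of cut_set
--                 is_absorbed = True
--                 break
--
--         if not is_absorbed:
--             minimal.append(cut_set)
--
--     # Remove duplicates by converting to frozenset and back
--     unique_minimal = [set(cs) for cs in {frozenset(cs) for cs in minimal}]
--
--     # Sort by size for consistent output
--     return sorted(unique_minimal, key=lambda x: (len(x), sorted(x)))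
-- ===== SOURCE B (Python) =====
-- def _remove_absorbed_cut_sets(cut_sets: list[set[str]]) -> list[set[str]]:
--     """Keep only the minimal cut sets: dedup, then an all-vs-all proper-subset test."""
--     if not cut_sets:
--         return []
--
--     unique = {frozenset(cs) for cs in cut_sets}
--     kept = [s for s in unique if not any(t < s for t in unique)]
--     return sorted([set(s) for s in kept], key=lambda x: (len(x), sorted(x)))
-- ===== Notes on version B (the rewrite author's own statement) =====
-- stated objective: simpler
-- what changed: B drops A's size-sorting pass and incremental 'minimal' accumulator: it deduplicates the family into frozensets once and keeps a set iff no other set in the family is a proper subset of it, via a direct all-vs-all scan.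
import Mathlib
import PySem

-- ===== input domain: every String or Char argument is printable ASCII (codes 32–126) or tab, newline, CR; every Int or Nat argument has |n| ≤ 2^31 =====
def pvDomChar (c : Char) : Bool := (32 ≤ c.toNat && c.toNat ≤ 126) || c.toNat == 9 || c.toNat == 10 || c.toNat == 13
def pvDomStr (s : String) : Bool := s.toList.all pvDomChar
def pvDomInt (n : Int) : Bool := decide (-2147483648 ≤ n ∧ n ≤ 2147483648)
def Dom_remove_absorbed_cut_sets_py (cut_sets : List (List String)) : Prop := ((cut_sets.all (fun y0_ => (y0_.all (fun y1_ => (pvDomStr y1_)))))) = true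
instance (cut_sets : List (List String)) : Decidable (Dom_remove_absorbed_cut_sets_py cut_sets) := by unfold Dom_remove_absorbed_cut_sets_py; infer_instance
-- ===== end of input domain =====

-- B replaces A's size-sort + incremental 'minimal' accumulator by a dedup followed by a direct
-- all-vs-all proper-subset scan (objective: simpler).  Python sets appear here as duplicate-free
-- lists; a frozenset is represented canonically as its sorted element list, and the returned sets
-- are emitted in that canonical (sorted) element order, which the output comparison ignores.

-- shared helpers (set primitives both Pythons use): a ⊆ b on element lists, and the canonical
-- (sorted) representative of a set / frozenset — Python's sorted(x) under the (len, sorted) keys.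
def pvSubB (a b : List String) : Bool := a.all (fun e => b.contains e)
def pvCanon (a : List String) : List String := PySem.List.sorted a (fun e => e) false

-- ===== PORT A =====
def remove_absorbed_cut_sets_py (cut_sets : List (List String)) : List (List String) :=
  if cut_sets.isEmpty then []
  else
    -- sorted(cut_sets, key=lambda x: (len(x), sorted(x)))
    let sorted_cut_sets := PySem.List.sorted2 cut_sets (fun x => x.length) pvCanon false
    -- the 'minimal' accumulator loop: append cut_set unless some minimal_set <= cut_set
    let minimal := sorted_cut_sets.foldl
      (fun minimal cut_set =>
        if minimal.any (fun minimal_set => pvSubB minimal_set cut_set) then minimal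
        else minimal ++ [cut_set]) []
    -- {frozenset(cs) for cs in minimal}: set of canonical representatives (order is irrelevant:
    -- the final sort key (len, sorted) is injective on distinct sets)
    let unique_minimal := PySem.Set.ofList (minimal.map pvCanon)
    PySem.List.sorted2 unique_minimal (fun x => x.length) pvCanon false

-- ===== PORT B =====
def remove_absorbed_cut_sets_py_alt (cut_sets : List (List String)) : List (List String) :=
  if cut_sets.isEmpty then []
  else
    -- unique = {frozenset(cs) for cs in cut_sets}
    let unique := PySem.Set.ofList (cut_sets.map pvCanon)
    -- kept = [s for s in unique if not any(t < s for t in unique)]  (t < s: proper subset)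
    let kept := unique.filter (fun s => !(unique.any (fun t => pvSubB t s && t != s)))
    PySem.List.sorted2 kept (fun x => x.length) pvCanon false

-- ===== PRECONDITION & SPEC =====
-- Pre_ restricts to the faithful encodings of A's argument (a list of Python SETS): each inner
-- list holds the distinct elements of a set, per the type convention; nothing A returns on is excluded.
def Pre_remove_absorbed_cut_sets_py (cut_sets : List (List String)) : Prop :=
  ∀ cs ∈ cut_sets, cs.Nodup
instance (cut_sets : List (List String)) : Decidable (Pre_remove_absorbed_cut_sets_py cut_sets) := by unfold Pre_remove_absorbed_cut_sets_py; infer_instance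

def pvWitness_remove_absorbed_cut_sets_py : List (List String) := [["a", "b"], ["b"], ["a", "b"], ["c", "a"]]

def Spec_remove_absorbed_cut_sets_py (cut_sets : List (List String)) (out : List (List String)) : Prop := out = remove_absorbed_cut_sets_py_alt cut_sets
instance (cut_sets : List (List String)) (out : List (List String)) : Decidable (Spec_remove_absorbed_cut_sets_py cut_sets out) := by unfold Spec_remove_absorbed_cut_sets_py; infer_instance

-- ===== CLAIM (what is proved, stated in full; the proofs are below) =====
def Claim_equal_remove_absorbed_cut_sets_py : Prop := ∀ (cut_sets : List (List String)), Dom_remove_absorbed_cut_sets_py cut_sets → Pre_remove_absorbed_cut_sets_py cut_sets → Spec_remove_absorbed_cut_sets_py cut_sets (remove_absorbed_cut_sets_py cut_sets)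

-- ===== LEMMAS AND PROOFS =====

theorem pvSubB_iff (a b : List String) : pvSubB a b = true ↔ a ⊆ b := by
  simp [pvSubB, List.subset_def]

theorem mem_pvCanon {e : String} {a : List String} : e ∈ pvCanon a ↔ e ∈ a :=
  PySem.List.mem_sorted a (fun e => e) false e

theorem pvCanon_perm (a : List String) : (pvCanon a).Perm a :=
  PySem.List.sorted_perm a _ _

theorem pvCanon_eq_of_perm {a b : List String} (h : a.Perm b) : pvCanon a = pvCanon b :=
  PySem.List.sorted_eq_sorted_of_perm a b (fun e => e) (fun _ _ h => h) h

theorem pvCanon_pvCanon (a : List String) : pvCanon (pvCanon a) = pvCanon a :=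
  PySem.List.sorted_sorted a _

theorem perm_of_pvCanon_eq {a b : List String} (h : pvCanon a = pvCanon b) : a.Perm b :=
  ((pvCanon_perm a).symm.trans (h ▸ pvCanon_perm b))

def pvStep (acc : List (List String)) (cs : List String) : List (List String) :=
  if acc.any (fun m => pvSubB m cs) then acc else acc ++ [cs]

theorem pvStep_sub (acc : List (List String)) (cs : List String) :
    acc ⊆ pvStep acc cs := by
  unfold pvStep; split_ifs <;> simp

theorem mem_foldl_pvStep_of_mem {S acc : List (List String)} {m : List String}
    (h : m ∈ acc) : m ∈ S.foldl pvStep acc := by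
  induction S generalizing acc with
  | nil => exact h
  | cons cs rest ih => exact ih (pvStep_sub acc cs h)

theorem mem_of_mem_foldl_pvStep {S acc : List (List String)} {m : List String}
    (h : m ∈ S.foldl pvStep acc) : m ∈ acc ∨ m ∈ S := by
  induction S generalizing acc with
  | nil => exact Or.inl h
  | cons cs rest ih =>
    rcases ih h with h' | h'
    · unfold pvStep at h'
      split_ifs at h' with hany
      · exact Or.inl h'
      · rcases List.mem_append.mp h' with h'' | h''
        · exact Or.inl h''
        · exact Or.inr (by simp at h''; simp [h''])
    · exact Or.inr (List.mem_cons_of_mem _ h')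

-- domination: every processed element has a subset in the result
theorem foldl_pvStep_dominates {S acc : List (List String)} {x : List String}
    (hx : x ∈ S) : ∃ m ∈ S.foldl pvStep acc, m ⊆ x := by
  induction S generalizing acc with
  | nil => cases hx
  | cons cs rest ih =>
    rw [List.foldl_cons]
    rcases List.mem_cons.mp hx with rfl | hx'
    · by_cases hany : acc.any (fun m => pvSubB m x) = true
      · rcases List.any_eq_true.mp hany with ⟨a, ha, hsub⟩
        exact ⟨a, mem_foldl_pvStep_of_mem (S := rest) (pvStep_sub acc x ha),
          (pvSubB_iff a x).mp hsub⟩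
      · refine ⟨x, mem_foldl_pvStep_of_mem (S := rest) ?_, List.Subset.refl x⟩
        unfold pvStep; rw [if_neg hany]; simp
    · exact ih hx'

-- soundness: a result element not from acc is minimal among all of S
theorem foldl_pvStep_sound {S acc : List (List String)} {m : List String}
    (hsorted : S.Pairwise (fun a b => a.length ≤ b.length))
    (hnd : ∀ x ∈ S, x.Nodup)
    (h : m ∈ S.foldl pvStep acc) :
    m ∈ acc ∨ (m ∈ S ∧ (∀ a ∈ acc, ¬ a ⊆ m) ∧ ∀ t ∈ S, ¬ (t ⊆ m ∧ ¬ m ⊆ t)) := by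
  induction S generalizing acc with
  | nil => exact Or.inl h
  | cons cs rest ih =>
    have hsorted' := (List.pairwise_cons.mp hsorted).2
    have hlen := (List.pairwise_cons.mp hsorted).1
    have hnd' : ∀ x ∈ rest, x.Nodup := fun x hx => hnd x (List.mem_cons_of_mem _ hx)
    rcases ih hsorted' hnd' h with h' | ⟨hmr, hacc', hmin⟩
    · -- m came from pvStep acc cs
      unfold pvStep at h'
      split_ifs at h' with hany
      · exact Or.inl h'
      · rcases List.mem_append.mp h' with h'' | h''
        · exact Or.inl h''
        · -- m = cs, freshly accepted
          have hm : m = cs := by simpa using h''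
          subst hm
          refine Or.inr ⟨List.mem_cons_self, ?_, ?_⟩
          · intro a ha hsub
            have := List.any_eq_false.mp (Bool.not_eq_true _ ▸ hany) a ha
            rw [(pvSubB_iff a m).mpr hsub] at this
            exact absurd this (by simp)
          · intro t ht ⟨hts, hst⟩
            rcases List.mem_cons.mp ht with rfl | ht'
            · exact hst hts
            · -- t after m in sorted order: |m| ≤ |t|, but t ⊊ m forces |t| < |m|
              have h1 : m.length ≤ t.length := hlen t ht'
              have h2 : t.Subperm m := (hnd t ht).subperm hts
              have h3 : t.length ≤ m.length := h2.length_le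
              have h4 : t.Perm m := h2.perm_of_length_le (by omega)
              exact hst (fun e he => (h4.mem_iff).mpr he)
    · -- m accepted later
      refine Or.inr ⟨List.mem_cons_of_mem _ hmr, ?_, ?_⟩
      · exact fun a ha => hacc' a (pvStep_sub acc cs ha)
      · intro t ht hstrict
        rcases List.mem_cons.mp ht with rfl | ht'
        · -- t = cs: cs (or a subset of it) is in pvStep acc cs, contradiction
          by_cases hany : acc.any (fun x => pvSubB x t) = true
          · rcases List.any_eq_true.mp hany with ⟨a, ha, hsub⟩
            exact hacc' a (pvStep_sub acc t ha)
              (fun e he => hstrict.1 ((pvSubB_iff a t).mp hsub he))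
          · have : t ∈ pvStep acc t := by unfold pvStep; rw [if_neg hany]; simp
            exact hacc' t this hstrict.1
        · exact hmin t ht' hstrict

def pvKey (x : List String) : Lex (Nat × List String) := toLex (x.length, pvCanon x)

theorem pvKey_inj {a b : List String} (ha : pvCanon a = a) (hb : pvCanon b = b)
    (h : pvKey a = pvKey b) : a = b := by
  have := congrArg (fun p => (ofLex p).2) h
  simpa [pvKey, ha, hb] using this

theorem sorted_pvKey_eq_of_mem_iff (U K : List (List String)) (hU : U.Nodup) (hK : K.Nodup)
    (hcanK : ∀ c ∈ K, pvCanon c = c) (hmem : ∀ c, c ∈ U ↔ c ∈ K) :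
    PySem.List.sorted U pvKey false = PySem.List.sorted K pvKey false := by
  have hperm : K.Perm U := (List.perm_ext_iff_of_nodup hK hU).mpr (fun c => (hmem c).symm)
  have hzp : (PySem.List.sorted K pvKey false).Perm K := PySem.List.sorted_perm K pvKey false
  have hnd : (PySem.List.sorted K pvKey false).Nodup := (hzp.nodup_iff).mpr hK
  have hpw : (PySem.List.sorted K pvKey false).Pairwise (fun a b => pvKey a ≤ pvKey b) :=
    PySem.List.sorted_pairwise K pvKey
  have hlt : (PySem.List.sorted K pvKey false).Pairwise (fun a b => pvKey a < pvKey b) := by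
    refine (hpw.and hnd).imp_of_mem ?_
    intro a b ha hb ⟨hle, hne⟩
    refine lt_of_le_of_ne hle (fun he => hne ?_)
    exact pvKey_inj (hcanK a ((hzp.mem_iff).mp ha)) (hcanK b ((hzp.mem_iff).mp hb)) he
  exact PySem.List.sorted_eq_of_perm_of_pairwise_lt U _ pvKey (hzp.trans hperm) hlt

theorem pv_subset_antisymm_canon {a b : List String} (hna : a.Nodup) (hnb : b.Nodup)
    (hab : a ⊆ b) (hba : b ⊆ a) : pvCanon a = pvCanon b :=
  pvCanon_eq_of_perm ((List.perm_ext_iff_of_nodup hna hnb).mpr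
    (fun _ => ⟨fun h => hab h, fun h => hba h⟩))

theorem pv_mem_iff (cut_sets : List (List String)) (hpre : ∀ cs ∈ cut_sets, cs.Nodup)
    (c : List String) :
    (c ∈ ((PySem.List.sorted cut_sets pvKey false).foldl pvStep []).map pvCanon) ↔
    (c ∈ (PySem.Set.ofList (cut_sets.map pvCanon)).filter
      (fun s => !((PySem.Set.ofList (cut_sets.map pvCanon)).any
        (fun t => pvSubB t s && t != s)))) := by
  set S := PySem.List.sorted cut_sets pvKey false with hSdef
  set Q := PySem.Set.ofList (cut_sets.map pvCanon) with hQdef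
  have hSperm : S.Perm cut_sets := PySem.List.sorted_perm cut_sets pvKey false
  have hSnd : ∀ x ∈ S, x.Nodup := fun x hx => hpre x (hSperm.mem_iff.mp hx)
  have hSsorted : S.Pairwise (fun a b => a.length ≤ b.length) := by
    refine (PySem.List.sorted_pairwise cut_sets pvKey).imp_of_mem ?_
    intro a b _ _ hle
    rcases Prod.Lex.toLex_le_toLex.mp hle with h | ⟨h, _⟩
    · exact Nat.le_of_lt h
    · exact Nat.le_of_eq h
  have hQmem : ∀ t, t ∈ Q ↔ ∃ y ∈ cut_sets, pvCanon y = t := by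
    intro t
    rw [hQdef, PySem.Set.mem_ofList, List.mem_map]
  constructor
  · rintro hc
    rcases List.mem_map.mp hc with ⟨m, hmM, rfl⟩
    rcases foldl_pvStep_sound hSsorted hSnd hmM with h | ⟨hmS, -, hmin⟩
    · cases h
    have hmnd : m.Nodup := hSnd m hmS
    refine List.mem_filter.mpr ⟨(hQmem _).mpr ⟨m, hSperm.mem_iff.mp hmS, rfl⟩, ?_⟩
    simp only [Bool.not_eq_eq_eq_not, Bool.not_true, List.any_eq_false]
    intro t htQ
    rcases (hQmem t).mp htQ with ⟨y, hy, rfl⟩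
    have hyS : y ∈ S := hSperm.mem_iff.mpr hy
    have hynd : y.Nodup := hpre y hy
    simp only [Bool.not_eq_true, Bool.and_eq_false_iff]
    by_cases hsub : pvSubB (pvCanon y) (pvCanon m) = true
    · right
      have hym : y ⊆ m := fun e he =>
        mem_pvCanon.mp ((pvSubB_iff _ _).mp hsub (mem_pvCanon.mpr he))
      have hmy : m ⊆ y := by
        by_contra hmy
        exact hmin y hyS ⟨hym, hmy⟩
      have := pv_subset_antisymm_canon hynd hmnd hym hmy
      simp [this]
    · left; simpa using hsub
  · intro hc
    rcases List.mem_filter.mp hc with ⟨hcQ, hpred⟩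
    rcases (hQmem c).mp hcQ with ⟨x, hx, rfl⟩
    have hxS : x ∈ S := hSperm.mem_iff.mpr hx
    have hxnd : x.Nodup := hpre x hx
    simp only [Bool.not_eq_eq_eq_not, Bool.not_true, List.any_eq_false] at hpred
    -- no strict subset of x anywhere in S
    have hnostrict : ∀ t ∈ S, ¬ (t ⊆ x ∧ ¬ x ⊆ t) := by
      rintro t htS ⟨hts, hst⟩
      have htc : t ∈ cut_sets := hSperm.mem_iff.mp htS
      have htnd : t.Nodup := hpre t htc
      have h1 : pvSubB (pvCanon t) (pvCanon x) = true :=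
        (pvSubB_iff _ _).mpr (fun e he => mem_pvCanon.mpr (hts (mem_pvCanon.mp he)))
      have h2 : pvCanon t ≠ pvCanon x := by
        intro he
        exact hst (fun e hex => (perm_of_pvCanon_eq he).symm.mem_iff.mp hex)
      have := hpred (pvCanon t) ((hQmem _).mpr ⟨t, htc, rfl⟩)
      simp [h1, h2] at this
    rcases foldl_pvStep_dominates (acc := []) hxS with ⟨m, hmM, hmx⟩
    have hmS : m ∈ S := by
      rcases mem_of_mem_foldl_pvStep hmM with h | h
      · cases h
      · exact h
    have hxm : x ⊆ m := by
      by_contra hxm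
      exact hnostrict m hmS ⟨hmx, hxm⟩
    exact List.mem_map.mpr ⟨m, hmM,
      pv_subset_antisymm_canon (hSnd m hmS) hxnd hmx hxm⟩


-- the two (len(x), sorted(x)) tuple-key sorts of the ports, as a single lex-key sort
theorem pv_sorted2_eq (xs : List (List String)) :
    PySem.List.sorted2 xs (fun x => x.length) pvCanon false
      = PySem.List.sorted xs pvKey false := by
  simp only [pvKey, PySem.List.sorted2, PySem.List.sorted,
    if_neg (by decide : ¬ (false = true))]
  congr 1
  funext acc x
  congr 1
  funext a b
  by_cases h1 : a.length < b.length
  · simp [h1, Prod.Lex.toLex_lt_toLex]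
  · by_cases h2 : b.length < a.length
    · simp only [Prod.Lex.toLex_lt_toLex]; simp [h1, h2]
      intro he; exact absurd (he ▸ h2) (lt_irrefl _)
    · have he : a.length = b.length := le_antisymm (not_lt.mp h2) (not_lt.mp h1)
      by_cases h3 : pvCanon a < pvCanon b <;> simp [h3, Prod.Lex.toLex_lt_toLex, he]

theorem remove_absorbed_cut_sets_py_spec' (cut_sets : List (List String))
    (hpre : ∀ cs ∈ cut_sets, cs.Nodup) :
    remove_absorbed_cut_sets_py cut_sets = remove_absorbed_cut_sets_py_alt cut_sets := by
  unfold remove_absorbed_cut_sets_py remove_absorbed_cut_sets_py_alt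
  by_cases hnil : cut_sets.isEmpty
  · simp [hnil]
  · simp only [hnil, Bool.false_eq_true, if_false]
    rw [pv_sorted2_eq, pv_sorted2_eq, pv_sorted2_eq]
    rw [show (fun (minimal : List (List String)) (cut_set : List String) =>
        if minimal.any (fun minimal_set => pvSubB minimal_set cut_set) then minimal
        else minimal ++ [cut_set]) = pvStep from rfl]
    refine sorted_pvKey_eq_of_mem_iff _ _ ?_ ?_ ?_ ?_
    · exact PySem.Set.nodup_ofList _
    · exact (PySem.Set.nodup_ofList _).filter _
    · intro c hc
      rcases List.mem_map.mp ((PySem.Set.mem_ofList _ _).mp (List.mem_filter.mp hc).1)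
        with ⟨y, _, rfl⟩
      exact pvCanon_pvCanon y
    · intro c
      rw [PySem.Set.mem_ofList]
      exact pv_mem_iff cut_sets hpre c

-- ===== VERDICT (by name: the statement is the Claim_ definition above) =====
theorem remove_absorbed_cut_sets_py_spec : Claim_equal_remove_absorbed_cut_sets_py := by
  intro cut_sets _ hpre
  unfold Spec_remove_absorbed_cut_sets_py
  exact remove_absorbed_cut_sets_py_spec' cut_sets hpre
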